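-- pv_equiv track=rewrite | github.com/adhishezio/NLP-based-Vehicle-Configuration-Request-Generator | BooleanDetection.py | add_parentheses
-- ===== SOURCE A (Python) =====
-- def add_parentheses(boolean_formula):
--     """
--     Adds parentheses to the given boolean formula.
--
--     Args:
--         boolean_formula (str): The boolean formula to which parentheses need to be added.
--
--     Returns:
--         str: The boolean formula with parentheses added.
--
--     Example:
--         If boolean_formula is "+A/B+C", the function will return "+(A/B)+C".
--
--     """
--     result = ""
--     abbreviation = boolean_formula.split('+')
--
--     # Iterate through abbreviations and add parentheses
--     for i, abbr in enumerate(abbreviation):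
--         if '/' in abbr:
--             result += '(' + abbr + ')'
--         else:
--             result += abbr
--
--         # Add '+' between abbreviations, except for the last one
--         if i < len(abbreviation) - 1:
--             result += '+'
--
--     return result
-- ===== SOURCE B (Python) =====
-- def _wrap(term):
--     return '(' + term + ')' if '/' in term else term
--
-- def add_parentheses(boolean_formula):
--     out = ""
--     term = ""
--     for ch in boolean_formula:
--         if ch == '+':
--             out += _wrap(term) + '+'
--             term = ""
--         else:
--             term += ch
--     return out + _wrap(term)
-- ===== Notes on version B (the rewrite author's own statement) =====
-- stated objective: simpler
-- what changed: Replaced the split/enumerate/index-bookkeeping scheme (split on the separator, wrap each segment, conditionally re-insert separators by index) with a single character scan that accumulates the current term and flushes it, wrapped when it contains a slash, at each separator and once at the end.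
import Mathlib
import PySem

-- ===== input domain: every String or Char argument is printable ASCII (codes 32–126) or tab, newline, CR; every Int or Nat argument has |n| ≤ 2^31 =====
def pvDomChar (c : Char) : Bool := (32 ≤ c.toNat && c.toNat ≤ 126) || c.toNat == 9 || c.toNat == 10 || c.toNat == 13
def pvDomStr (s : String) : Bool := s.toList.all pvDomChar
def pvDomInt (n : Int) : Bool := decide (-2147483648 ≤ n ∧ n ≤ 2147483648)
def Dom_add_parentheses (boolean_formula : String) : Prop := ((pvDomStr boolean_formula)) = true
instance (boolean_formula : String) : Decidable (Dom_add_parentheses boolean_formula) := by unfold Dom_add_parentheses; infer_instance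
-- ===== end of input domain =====

-- B replaces A's split/enumerate/join-with-index scheme with a single character scan
-- that flushes the accumulated term at each '+': simpler, same O(n) cost.

-- ===== PORT A =====
def add_parentheses (boolean_formula : String) : String :=
  let abbreviation := PySem.Chars.splitOn boolean_formula.toList ['+']
  let result := (PySem.List.enumerate abbreviation).foldl
    (fun result ia =>
      let result :=
        if PySem.Chars.isIn ['/'] ia.2 then result ++ ['('] ++ ia.2 ++ [')']
        else result ++ ia.2
      if ia.1 < (abbreviation.length : Int) - 1 then result ++ ['+'] else result)
    []
  String.mk result

-- ===== PORT B =====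
-- Source B's _wrap helper
def pvWrap (term : List Char) : List Char :=
  if PySem.Chars.isIn ['/'] term then ['('] ++ term ++ [')'] else term

def add_parentheses_alt (boolean_formula : String) : String :=
  let st := boolean_formula.toList.foldl
    (fun st c =>
      if c = '+' then (st.1 ++ pvWrap st.2 ++ ['+'], ([] : List Char))
      else (st.1, st.2 ++ [c]))
    (([] : List Char), ([] : List Char))
  String.mk (st.1 ++ pvWrap st.2)

-- ===== PRECONDITION & SPEC =====
def Spec_add_parentheses (boolean_formula : String) (out : String) : Prop := out = add_parentheses_alt boolean_formula
instance (boolean_formula : String) (out : String) : Decidable (Spec_add_parentheses boolean_formula out) := by unfold Spec_add_parentheses; infer_instance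

-- ===== CLAIM (what is proved, stated in full; the proofs are below) =====
def Claim_equal_add_parentheses : Prop := ∀ (boolean_formula : String), Dom_add_parentheses boolean_formula → Spec_add_parentheses boolean_formula (add_parentheses boolean_formula)

-- ===== LEMMAS AND PROOFS =====

/-- splitting on '+', with the current (already reversed) segment as accumulator -/
def pvSplitP : List Char → List Char → List (List Char)
  | [], cur => [cur]
  | c :: rest, cur =>
      if c = '+' then cur :: pvSplitP rest [] else pvSplitP rest (cur ++ [c])

/-- the common shape of both outputs: wrapped segments joined by '+' -/
def pvJoin : List (List Char) → List Char
  | [] => []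
  | [p] => pvWrap p
  | p :: q :: ps => pvWrap p ++ '+' :: pvJoin (q :: ps)

theorem pvSplitP_ne_nil (l cur : List Char) : pvSplitP l cur ≠ [] := by
  induction l generalizing cur with
  | nil => simp [pvSplitP]
  | cons c rest ih =>
    simp only [pvSplitP]
    split_ifs
    · simp
    · exact ih _

theorem pvGo_eq : ∀ (fuel : Nat) (l cur : List Char) (acc : List (List Char)),
    l.length < fuel →
    PySem.Chars.splitOn.go ['+'] fuel l cur acc = acc.reverse ++ pvSplitP l cur.reverse := by
  intro fuel
  induction fuel with
  | zero => intro l cur acc h; omega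
  | succ fuel ih =>
    intro l cur acc h
    match l with
    | [] => simp [PySem.Chars.splitOn.go, pvSplitP]
    | c :: rest =>
      by_cases hc : c = '+'
      · subst hc
        rw [show PySem.Chars.splitOn.go ['+'] (fuel + 1) ('+' :: rest) cur acc
              = PySem.Chars.splitOn.go ['+'] fuel rest [] (cur.reverse :: acc) from by
            simp [PySem.Chars.splitOn.go, List.isPrefixOf]]
        simp only [List.length_cons] at h
        rw [ih rest [] (cur.reverse :: acc) (by omega)]
        simp [pvSplitP]
      · rw [show PySem.Chars.splitOn.go ['+'] (fuel + 1) (c :: rest) cur acc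
              = PySem.Chars.splitOn.go ['+'] fuel rest (c :: cur) acc from by
            simp [PySem.Chars.splitOn.go, List.isPrefixOf, Ne.symm hc]]
        simp only [List.length_cons] at h
        rw [ih rest (c :: cur) acc (by omega)]
        simp [pvSplitP, hc]

theorem pvSplitOn_eq (l : List Char) :
    PySem.Chars.splitOn l ['+'] = pvSplitP l [] := by
  have := pvGo_eq (l.length + 1) l [] [] (by omega)
  simpa [PySem.Chars.splitOn] using this

/-- A's loop body, with the full-list length abstracted -/
def pvFA (n : Nat) (result : List Char) (ia : Int × List Char) : List Char :=
  let result :=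
    if PySem.Chars.isIn ['/'] ia.2 then result ++ ['('] ++ ia.2 ++ [')']
    else result ++ ia.2
  if ia.1 < (n : Int) - 1 then result ++ ['+'] else result

theorem pvFA_eq (n : Nat) (acc : List Char) (ia : Int × List Char) :
    pvFA n acc ia = acc ++ pvWrap ia.2 ++ (if ia.1 < (n : Int) - 1 then ['+'] else []) := by
  unfold pvFA pvWrap
  split_ifs <;> simp

theorem pvFoldA (n : Nat) :
    ∀ (ps : List (List Char)) (acc : List Char), ps.length ≤ n →
    (PySem.List.enumerate ps ((n : Int) - ps.length)).foldl (pvFA n) acc = acc ++ pvJoin ps := by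
  intro ps
  induction ps with
  | nil => intro acc _; simp [PySem.List.enumerate, pvJoin]
  | cons p ps ih =>
    intro acc hle
    rw [PySem.List.enumerate_cons, List.foldl_cons, pvFA_eq]
    have hstep : ((n : Int) - (p :: ps).length) + 1 = (n : Int) - ps.length := by
      push_cast [List.length_cons]; ring
    rw [hstep]
    cases ps with
    | nil =>
      have hidx : ¬ ((n : Int) - ([p] : List (List Char)).length < (n : Int) - 1) := by
        simp
      rw [if_neg hidx]
      simp [PySem.List.enumerate, pvJoin]
    | cons q qs =>
      have hidx : ((n : Int) - ((p :: q :: qs : List (List Char)).length) < (n : Int) - 1) := by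
        simp only [List.length_cons] at hle ⊢
        push_cast; omega
      rw [if_pos hidx, ih _ (by simp at hle ⊢; omega)]
      rw [show pvJoin (p :: q :: qs) = pvWrap p ++ '+' :: pvJoin (q :: qs) from rfl]
      simp

theorem pvFoldB (cs : List Char) :
    ∀ (out term : List Char),
    (cs.foldl
        (fun st c =>
          if c = '+' then (st.1 ++ pvWrap st.2 ++ ['+'], ([] : List Char))
          else (st.1, st.2 ++ [c]))
        (out, term)).1
      ++ pvWrap (cs.foldl
        (fun st c =>
          if c = '+' then (st.1 ++ pvWrap st.2 ++ ['+'], ([] : List Char))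
          else (st.1, st.2 ++ [c]))
        (out, term)).2
    = out ++ pvJoin (pvSplitP cs term) := by
  induction cs with
  | nil => intro out term; simp [pvSplitP, pvJoin]
  | cons c rest ih =>
    intro out term
    simp only [List.foldl_cons]
    by_cases hc : c = '+'
    · subst hc
      rw [if_pos rfl]
      simp only [pvSplitP]
      rw [ih (out ++ pvWrap term ++ ['+']) []]
      obtain ⟨x, xs, hx⟩ := List.exists_cons_of_ne_nil (pvSplitP_ne_nil rest [])
      simp [hx, pvJoin]
    · rw [if_neg hc]
      simp only [pvSplitP, if_neg hc]
      exact ih out (term ++ [c])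

theorem pvPortA_eq (s : String) :
    add_parentheses s = String.mk
      ((PySem.List.enumerate (PySem.Chars.splitOn s.toList ['+'])).foldl
        (pvFA (PySem.Chars.splitOn s.toList ['+']).length) []) := rfl

theorem pvPortB_eq (s : String) :
    add_parentheses_alt s = String.mk
      ((s.toList.foldl
          (fun st c =>
            if c = '+' then (st.1 ++ pvWrap st.2 ++ ['+'], ([] : List Char))
            else (st.1, st.2 ++ [c]))
          ([], [])).1
        ++ pvWrap ((s.toList.foldl
          (fun st c =>
            if c = '+' then (st.1 ++ pvWrap st.2 ++ ['+'], ([] : List Char))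
            else (st.1, st.2 ++ [c]))
          ([], [])).2)) := rfl

-- ===== VERDICT (by name: the statement is the Claim_ definition above) =====
theorem add_parentheses_spec : Claim_equal_add_parentheses := by
  intro s _
  unfold Spec_add_parentheses
  rw [pvPortA_eq, pvPortB_eq, pvSplitOn_eq, pvFoldB]
  have hA := pvFoldA (pvSplitP s.toList []).length (pvSplitP s.toList []) [] le_rfl
  simp only [List.nil_append, sub_self] at hA ⊢
  rw [hA]
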